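-- pv_equiv track=rewrite | github.com/DewPeaceTigers/AlgorithmStudy | weeks/week_15/PG_17679/yeri.py | find
-- ===== SOURCE A (Python) =====
-- def find(board,n,m):
--     pop=set()
--     for i in range(m-1):
--         for j in range(n-1):
--             if board[i][j]==board[i][j+1]==board[i+1][j]==board[i+1][j+1]!=0:
--                 pop |= set([(i,j),(i,j+1),(i+1,j),(i+1,j+1)])
--     for i,j in pop:
--         board[i][j]=0
--     return len(pop)
-- ===== SOURCE B (Python) =====
-- def find(board, n, m):
--     def good(a, b):
--         if 0 <= a <= m - 2 and 0 <= b <= n - 2: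
--             v = board[a][b]
--             return v != 0 and v == board[a][b + 1] == board[a + 1][b] == board[a + 1][b + 1]
--         return False
--
--     hits = [(i, j) for i in range(m) for j in range(n)
--             if good(i, j) or good(i - 1, j) or good(i, j - 1) or good(i - 1, j - 1)]
--     for i, j in hits:
--         board[i][j] = 0
--     return len(hits)
-- ===== Notes on version B (the rewrite author's own statement) =====
-- stated objective: simpler
-- what changed: Instead of accumulating a set of cleared positions block-by-block, B counts (and clears) each grid cell directly via a per-cell predicate 'this cell belongs to some matching 2x2 block', checking at most four candidate blocks per cell, so the set data structure disappears.
import Mathlib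
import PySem

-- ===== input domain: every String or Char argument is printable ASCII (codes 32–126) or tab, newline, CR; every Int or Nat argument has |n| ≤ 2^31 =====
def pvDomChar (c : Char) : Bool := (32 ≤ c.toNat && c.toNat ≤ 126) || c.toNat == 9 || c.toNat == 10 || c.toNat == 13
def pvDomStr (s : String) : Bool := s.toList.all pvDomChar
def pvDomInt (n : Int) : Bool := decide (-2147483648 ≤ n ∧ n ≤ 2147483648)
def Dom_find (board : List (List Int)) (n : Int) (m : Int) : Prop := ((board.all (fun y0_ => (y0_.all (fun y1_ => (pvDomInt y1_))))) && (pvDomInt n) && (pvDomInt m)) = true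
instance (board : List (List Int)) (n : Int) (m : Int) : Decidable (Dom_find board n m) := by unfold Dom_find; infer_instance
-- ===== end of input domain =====

-- B replaces A's set of cleared positions by a per-cell "belongs to a matching 2x2 block"
-- predicate (objective: simpler). Both Pythons mutate `board` identically; the equivalence
-- proved here is about the RETURN value.

-- ===== PORT A =====
-- board[i][j], total under Pre_find (indices in range there); default only fills the raise cases
def bget (board : List (List Int)) (i j : Int) : Int :=
  PySem.List.pyGetD (PySem.List.pyGetD board i []) j 0

-- the chained comparison board[i][j]==board[i][j+1]==board[i+1][j]==board[i+1][j+1]!=0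
def blockA (board : List (List Int)) (i j : Int) : Bool :=
  decide (bget board i j = bget board i (j+1) ∧
          bget board i (j+1) = bget board (i+1) j ∧
          bget board (i+1) j = bget board (i+1) (j+1) ∧
          bget board (i+1) (j+1) ≠ 0)

def find (board : List (List Int)) (n : Int) (m : Int) : Int :=
  -- pop = set(); nested loop over blocks; pop |= {4 corners} on a match
  let pop : PySem.Set (Int × Int) :=
    (PySem.List.pyRange 0 (m-1) 1).foldl (fun s i =>
      (PySem.List.pyRange 0 (n-1) 1).foldl (fun s j =>
        if blockA board i j then
          PySem.Set.union s (PySem.Set.ofList [(i,j), (i,j+1), (i+1,j), (i+1,j+1)])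
        else s) s) PySem.Set.empty
  -- the final 'for i,j in pop: board[i][j]=0' only mutates board (not the return value)
  (pop.length : Int)

-- ===== PORT B =====
-- good(a,b): block with top-left (a,b) is inside the grid and matches (nonzero, all equal)
def goodB (board : List (List Int)) (n m a b : Int) : Bool :=
  if 0 ≤ a ∧ a ≤ m - 2 ∧ 0 ≤ b ∧ b ≤ n - 2 then
    decide (bget board a b ≠ 0 ∧
            bget board a b = bget board a (b+1) ∧
            bget board a (b+1) = bget board (a+1) b ∧
            bget board (a+1) b = bget board (a+1) (b+1))
  else false

def coveredB (board : List (List Int)) (n m i j : Int) : Bool :=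
  goodB board n m i j || goodB board n m (i-1) j ||
  goodB board n m i (j-1) || goodB board n m (i-1) (j-1)

def find_alt (board : List (List Int)) (n : Int) (m : Int) : Int :=
  -- hits = [(i,j) for i in range(m) for j in range(n) if good(..) or ..]; clearing loop mutates only
  let hits : List (Int × Int) :=
    (PySem.List.pyRange 0 m 1).flatMap (fun i =>
      ((PySem.List.pyRange 0 n 1).filter (fun j => coveredB board n m i j)).map (fun j => (i, j)))
  (hits.length : Int)

-- ===== PRECONDITION & SPEC =====
-- Pre_ excludes exactly the inputs where Python A raises IndexError: when the block loops run
-- (m ≥ 2 and n ≥ 2) the board must supply the accessed m rows of length ≥ n.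
def Pre_find (board : List (List Int)) (n : Int) (m : Int) : Prop :=
  (!(decide (2 ≤ m) && decide (2 ≤ n)) ||
    (decide (m ≤ (board.length : Int)) &&
      (board.take m.toNat).all (fun row => decide (n ≤ (row.length : Int))))) = true
instance (board : List (List Int)) (n : Int) (m : Int) : Decidable (Pre_find board n m) := by
  unfold Pre_find; infer_instance

def pvWitness_find : List (List Int) × Int × Int := ([[1, 1], [1, 2]], 2, 2)

def Spec_find (board : List (List Int)) (n : Int) (m : Int) (out : Int) : Prop := out = find_alt board n m
instance (board : List (List Int)) (n : Int) (m : Int) (out : Int) : Decidable (Spec_find board n m out) := by unfold Spec_find; infer_instance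

-- ===== CLAIM (what is proved, stated in full; the proofs are below) =====
def Claim_equal_find : Prop := ∀ (board : List (List Int)) (n : Int) (m : Int), Dom_find board n m → Pre_find board n m → Spec_find board n m (find board n m)

-- ===== LEMMAS AND PROOFS =====

-- the cells A's loop ever inserts into pop
def Marked (board : List (List Int)) (n m : Int) (p : Int × Int) : Prop :=
  ∃ a b, 0 ≤ a ∧ a < m - 1 ∧ 0 ≤ b ∧ b < n - 1 ∧ blockA board a b = true ∧
    (p = (a, b) ∨ p = (a, b+1) ∨ p = (a+1, b) ∨ p = (a+1, b+1))

theorem mem_foldl_union_if {α β : Type} [BEq α] [LawfulBEq α] (l : List β) (c : β → Bool)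
    (f : β → List α) (s : PySem.Set α) (p : α) :
    p ∈ l.foldl (fun s x => if c x then PySem.Set.union s (PySem.Set.ofList (f x)) else s) s ↔
      p ∈ s ∨ ∃ x ∈ l, c x = true ∧ p ∈ f x := by
  induction l generalizing s with
  | nil => simp
  | cons y t ih =>
    simp only [List.foldl_cons, ih]
    by_cases h : c y = true
    · simp [h, PySem.Set.mem_union, PySem.Set.mem_ofList]; tauto
    · simp only [h]
      constructor
      · rintro (hp | ⟨x, hx, hc, hpf⟩)
        · exact Or.inl hp
        · exact Or.inr ⟨x, List.mem_cons_of_mem _ hx, hc, hpf⟩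
      · rintro (hp | ⟨x, hx, hc, hpf⟩)
        · exact Or.inl hp
        · rcases List.mem_cons.mp hx with rfl | hx'
          · exact absurd hc h
          · exact Or.inr ⟨x, hx', hc, hpf⟩

theorem nodup_foldl_union_if {α β : Type} [BEq α] [LawfulBEq α] (l : List β) (c : β → Bool)
    (f : β → List α) (s : PySem.Set α) (hs : s.Nodup) :
    (l.foldl (fun s x => if c x then PySem.Set.union s (PySem.Set.ofList (f x)) else s) s).Nodup := by
  induction l generalizing s with
  | nil => exact hs
  | cons y t ih =>
    simp only [List.foldl_cons]
    apply ih
    by_cases h : c y = true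
    · simp only [h, if_true]; exact PySem.Set.nodup_union _ _ hs
    · simpa [h] using hs

theorem mem_foldl_union_if2 {α β γ : Type} [BEq α] [LawfulBEq α] (l1 : List β) (l2 : List γ)
    (c : β → γ → Bool) (f : β → γ → List α) (s : PySem.Set α) (p : α) :
    p ∈ l1.foldl (fun s i => l2.foldl (fun s j =>
        if c i j then PySem.Set.union s (PySem.Set.ofList (f i j)) else s) s) s ↔
      p ∈ s ∨ ∃ i ∈ l1, ∃ j ∈ l2, c i j = true ∧ p ∈ f i j := by
  induction l1 generalizing s with
  | nil => simp
  | cons y t ih =>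
    simp only [List.foldl_cons, ih, mem_foldl_union_if, List.mem_cons]
    constructor
    · rintro ((hp | h) | ⟨i, hi, h⟩)
      · exact Or.inl hp
      · exact Or.inr ⟨y, Or.inl rfl, h⟩
      · exact Or.inr ⟨i, Or.inr hi, h⟩
    · rintro (hp | ⟨i, (rfl | hi), h⟩)
      · exact Or.inl (Or.inl hp)
      · exact Or.inl (Or.inr h)
      · exact Or.inr ⟨i, hi, h⟩

theorem nodup_foldl_union_if2 {α β γ : Type} [BEq α] [LawfulBEq α] (l1 : List β) (l2 : List γ)
    (c : β → γ → Bool) (f : β → γ → List α) (s : PySem.Set α) (hs : s.Nodup) :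
    (l1.foldl (fun s i => l2.foldl (fun s j =>
        if c i j then PySem.Set.union s (PySem.Set.ofList (f i j)) else s) s) s).Nodup := by
  induction l1 generalizing s with
  | nil => exact hs
  | cons y t ih =>
    simp only [List.foldl_cons]
    exact ih _ (nodup_foldl_union_if l2 (c y) (f y) s hs)

theorem nodup_pyRange1 (a b : Int) : (PySem.List.pyRange a b 1).Nodup := by
  rw [PySem.List.pyRange_one]
  exact List.nodup_range.map fun x y h => by omega

theorem goodB_iff (board : List (List Int)) (n m a b : Int) :
    goodB board n m a b = true ↔
      0 ≤ a ∧ a < m - 1 ∧ 0 ≤ b ∧ b < n - 1 ∧ blockA board a b = true := by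
  unfold goodB blockA
  split_ifs with h
  · simp only [decide_eq_true_eq]
    constructor
    · rintro ⟨h0, h1, h2, h3⟩
      exact ⟨h.1, by omega, h.2.2.1, by omega, h1, h2, h3, by omega⟩
    · rintro ⟨_, _, _, _, h1, h2, h3, h4⟩
      exact ⟨by omega, h1, h2, h3⟩
  · simp only [false_iff]
    rintro ⟨h0, h1, h2, h3, _⟩
    exact h ⟨h0, by omega, h2, by omega⟩

theorem covered_iff (board : List (List Int)) (n m i j : Int) :
    coveredB board n m i j = true ↔ Marked board n m (i, j) := by
  have hrw : coveredB board n m i j = true ↔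
      (goodB board n m i j = true ∨ goodB board n m (i-1) j = true ∨
       goodB board n m i (j-1) = true ∨ goodB board n m (i-1) (j-1) = true) := by
    unfold coveredB
    simp [Bool.or_eq_true, or_assoc]
  rw [hrw]
  simp only [goodB_iff]
  unfold Marked
  constructor
  · rintro (h | h | h | h) <;> obtain ⟨h0, h1, h2, h3, hb⟩ := h
    · exact ⟨i, j, h0, h1, h2, h3, hb, Or.inl rfl⟩
    · refine ⟨i - 1, j, h0, h1, h2, h3, hb, Or.inr (Or.inr (Or.inl ?_))⟩
      rw [show i - 1 + 1 = i from by omega]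
    · refine ⟨i, j - 1, h0, h1, h2, h3, hb, Or.inr (Or.inl ?_)⟩
      rw [show j - 1 + 1 = j from by omega]
    · refine ⟨i - 1, j - 1, h0, h1, h2, h3, hb, Or.inr (Or.inr (Or.inr ?_))⟩
      rw [show i - 1 + 1 = i from by omega, show j - 1 + 1 = j from by omega]
  · rintro ⟨a, b, h0, h1, h2, h3, hb, hp⟩
    simp only [Prod.mk.injEq] at hp
    rcases hp with ⟨rfl, rfl⟩ | ⟨rfl, rfl⟩ | ⟨rfl, rfl⟩ | ⟨rfl, rfl⟩
    · exact Or.inl ⟨h0, h1, h2, h3, hb⟩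
    · refine Or.inr (Or.inr (Or.inl ⟨h0, h1, by omega, by omega, ?_⟩))
      rw [show b + 1 - 1 = b from by omega]; exact hb
    · refine Or.inr (Or.inl ⟨by omega, by omega, h2, h3, ?_⟩)
      rw [show a + 1 - 1 = a from by omega]; exact hb
    · refine Or.inr (Or.inr (Or.inr ⟨by omega, by omega, by omega, by omega, ?_⟩))
      rw [show a + 1 - 1 = a from by omega, show b + 1 - 1 = b from by omega]; exact hb

theorem marked_iff (board : List (List Int)) (n m : Int) (p : Int × Int) :
    (p ∈ (PySem.Set.empty : PySem.Set (Int × Int)) ∨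
      ∃ i ∈ PySem.List.pyRange 0 (m - 1) 1, ∃ j ∈ PySem.List.pyRange 0 (n - 1) 1,
        blockA board i j = true ∧ p ∈ [(i, j), (i, j + 1), (i + 1, j), (i + 1, j + 1)]) ↔
      Marked board n m p := by
  unfold Marked
  simp only [show (PySem.Set.empty : PySem.Set (Int × Int)) = [] from rfl,
    List.not_mem_nil, false_or, PySem.List.mem_pyRange_one, List.mem_cons,
    List.not_mem_nil, or_false]
  constructor
  · rintro ⟨i, ⟨hi0, hi1⟩, j, ⟨hj0, hj1⟩, hc, hp⟩
    exact ⟨i, j, hi0, hi1, hj0, hj1, hc, hp⟩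
  · rintro ⟨a, b, h0, h1, h2, h3, hc, hp⟩
    exact ⟨a, ⟨h0, h1⟩, b, ⟨h2, h3⟩, hc, hp⟩

theorem marked_mem_grid (board : List (List Int)) (n m : Int) (p : Int × Int)
    (h : Marked board n m p) :
    p ∈ (PySem.List.pyRange 0 m 1).flatMap
      (fun i => (PySem.List.pyRange 0 n 1).map (fun j => (i, j))) := by
  obtain ⟨a, b, h0, h1, h2, h3, _, hp⟩ := h
  simp only [List.mem_flatMap, List.mem_map, PySem.List.mem_pyRange_one]
  rcases hp with rfl | rfl | rfl | rfl
  · exact ⟨a, ⟨h0, by omega⟩, b, ⟨h2, by omega⟩, rfl⟩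
  · exact ⟨a, ⟨h0, by omega⟩, b + 1, ⟨by omega, by omega⟩, rfl⟩
  · exact ⟨a + 1, ⟨by omega, by omega⟩, b, ⟨h2, by omega⟩, rfl⟩
  · exact ⟨a + 1, ⟨by omega, by omega⟩, b + 1, ⟨by omega, by omega⟩, rfl⟩

theorem hits_eq_filter (board : List (List Int)) (n m : Int) :
    (PySem.List.pyRange 0 m 1).flatMap
      (fun i => ((PySem.List.pyRange 0 n 1).filter (fun j => coveredB board n m i j)).map
        (fun j => (i, j)))
    = (((PySem.List.pyRange 0 m 1).flatMap
        (fun i => (PySem.List.pyRange 0 n 1).map (fun j => (i, j)))).filter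
          (fun p => coveredB board n m p.1 p.2)) := by
  rw [List.filter_flatMap]
  congr 1
  funext i
  rw [List.filter_map]
  rfl

theorem grid_nodup (n m : Int) :
    ((PySem.List.pyRange 0 m 1).flatMap
      (fun i => (PySem.List.pyRange 0 n 1).map (fun j => (i, j)))).Nodup :=
  List.Nodup.product (nodup_pyRange1 0 m) (nodup_pyRange1 0 n)

set_option maxHeartbeats 1000000 in
theorem pop_perm (board : List (List Int)) (n m : Int) :
    ((PySem.List.pyRange 0 (m - 1) 1).foldl (fun s i =>
      (PySem.List.pyRange 0 (n - 1) 1).foldl (fun s j =>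
        if blockA board i j then
          PySem.Set.union s (PySem.Set.ofList [(i, j), (i, j + 1), (i + 1, j), (i + 1, j + 1)])
        else s) s) PySem.Set.empty).Perm
    (((PySem.List.pyRange 0 m 1).flatMap
        (fun i => (PySem.List.pyRange 0 n 1).map (fun j => (i, j)))).filter
          (fun p => coveredB board n m p.1 p.2)) := by
  refine (List.perm_ext_iff_of_nodup ?_ ((grid_nodup n m).filter _)).mpr fun p => ?_
  · exact nodup_foldl_union_if2 _ _ (blockA board)
      (fun i j => [(i, j), (i, j + 1), (i + 1, j), (i + 1, j + 1)]) PySem.Set.empty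
      List.nodup_nil
  · refine ((mem_foldl_union_if2 _ _ (blockA board)
      (fun i j => [(i, j), (i, j + 1), (i + 1, j), (i + 1, j + 1)]) PySem.Set.empty p).trans
        ((marked_iff board n m p).trans ?_))
    rw [List.mem_filter]
    constructor
    · intro h
      refine ⟨marked_mem_grid board n m p h, ?_⟩
      obtain ⟨i, j⟩ := p
      exact (covered_iff board n m i j).mpr h
    · rintro ⟨_, hc⟩
      obtain ⟨i, j⟩ := p
      exact (covered_iff board n m i j).mp hc

theorem core_count (board : List (List Int)) (n : Int) (m : Int) :
    find board n m = find_alt board n m := by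
  simp only [find, find_alt]
  rw [hits_eq_filter board n m]
  exact_mod_cast (pop_perm board n m).length_eq

-- ===== VERDICT (by name: the statement is the Claim_ definition above) =====
theorem find_spec : Claim_equal_find := by
  intro board n m _ _
  unfold Spec_find
  exact core_count board n m
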